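-- pv_equiv track=rewrite | github.com/Learning-mohameml/Algo | Exercices/leetCode/1071_GCOD_string/main.py | is_gcod
-- ===== SOURCE A (Python) =====
-- def is_gcod(str1 : str , str2 : str) :
--     if str2 not in str1 :
--         return False
--
--     if len(str1) % len(str2) != 0 :
--         return False
--
--     for i in range(0 , len(str1) , len(str2)):
--         if str1[i : i + len(str2)] != str2 :
--             return False
--
--     return True
-- ===== SOURCE B (Python) =====
-- def is_gcod(str1 : str , str2 : str) :
--     n, m = len(str1), len(str2)
--     if m == 0 or n < m or n % m != 0:
--         return False
--     return str1 == str2 * (n // m)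
-- ===== Notes on version B (the rewrite author's own statement) =====
-- stated objective: simpler
-- what changed: B replaces A's per-block slice-verification loop by the closed-form comparison str1 == str2 * (len(str1)//len(str2)) after length/divisibility guards, and replaces A's substring scan by a length guard; on empty str2 (excluded by Pre_) A raises ZeroDivisionError while B returns False.
import Mathlib
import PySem

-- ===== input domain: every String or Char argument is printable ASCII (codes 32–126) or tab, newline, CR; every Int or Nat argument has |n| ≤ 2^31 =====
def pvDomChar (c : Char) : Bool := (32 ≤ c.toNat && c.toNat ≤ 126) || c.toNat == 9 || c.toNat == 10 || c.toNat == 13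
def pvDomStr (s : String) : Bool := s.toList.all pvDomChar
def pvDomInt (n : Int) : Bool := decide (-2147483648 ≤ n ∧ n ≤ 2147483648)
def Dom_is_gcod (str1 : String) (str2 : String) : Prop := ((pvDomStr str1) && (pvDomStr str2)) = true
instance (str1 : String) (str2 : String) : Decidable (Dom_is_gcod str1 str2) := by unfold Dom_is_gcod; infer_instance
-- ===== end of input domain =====

-- B replaces A's per-block slice-verification loop by length/divisibility guards plus one
-- closed-form comparison str1 == str2 * (len(str1)//len(str2)), and replaces A's substring
-- scan by a length guard; on str2 = "" (outside Pre_) A raises ZeroDivisionError while B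
-- returns False.


-- ===== PORT A =====
def is_gcod (str1 : String) (str2 : String) : Bool :=
  if !(PySem.Str.isIn str2 str1) then false
  else if PySem.Int.mod (PySem.Str.len str1) (PySem.Str.len str2) ≠ 0 then false
  else
    (PySem.List.pyRange 0 (PySem.Str.len str1) (PySem.Str.len str2)).all
      (fun i => PySem.Str.slice str1 (some i) (some (i + PySem.Str.len str2)) == str2)

-- ===== PORT B =====
def is_gcod_alt (str1 : String) (str2 : String) : Bool :=
  let n := PySem.Str.len str1
  let m := PySem.Str.len str2
  if m = 0 ∨ n < m ∨ PySem.Int.mod n m ≠ 0 then false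
  else str1 == String.ofList (PySem.List.pyRepeat str2.toList (PySem.Int.floordiv n m))

-- ===== PRECONDITION & SPEC =====
-- Pre_ excludes exactly str2 = "", where A raises ZeroDivisionError (len(str1) % 0).
def Pre_is_gcod (str1 : String) (str2 : String) : Prop := str2 ≠ ""
instance (str1 : String) (str2 : String) : Decidable (Pre_is_gcod str1 str2) := by unfold Pre_is_gcod; infer_instance
def pvWitness_is_gcod : String × String := ("abab", "ab")

def Spec_is_gcod (str1 : String) (str2 : String) (out : Bool) : Prop := out = is_gcod_alt str1 str2
instance (str1 : String) (str2 : String) (out : Bool) : Decidable (Spec_is_gcod str1 str2 out) := by unfold Spec_is_gcod; infer_instance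

-- ===== CLAIM (what is proved, stated in full; the proofs are below) =====
def Claim_equal_is_gcod : Prop := ∀ (str1 : String) (str2 : String), Dom_is_gcod str1 str2 → Pre_is_gcod str1 str2 → Spec_is_gcod str1 str2 (is_gcod str1 str2)

-- ===== LEMMAS AND PROOFS =====

theorem pyRepeat_natCast (t : List Char) (q : Nat) :
    PySem.List.pyRepeat t ((q:Nat):Int) = (List.replicate q t).flatten := by
  simp [PySem.List.pyRepeat]

theorem beq_str_iff (a b : String) : (a == b) = true ↔ a.toList = b.toList := by
  rw [beq_iff_eq]; exact ⟨congrArg _, String.ext⟩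

theorem slice_block (s : String) (j n : Nat) :
    (PySem.Str.slice s (some ((j:Int))) (some ((j:Int) + (n:Int)))).toList
      = (s.toList.drop j).take n := by
  simp [PySem.Str.toList_slice, PySem.List.slice_natCast_add]

-- all length-m blocks of s equal t iff s is q concatenated copies of t
theorem tile_iff (t : List Char) :
    ∀ (q : Nat) (s : List Char), s.length = q * t.length →
      ((∀ k : Nat, k < q → (s.drop (k * t.length)).take t.length = t) ↔
        s = (List.replicate q t).flatten) := by
  intro q
  induction q with
  | zero =>
    intro s hs
    simp only [Nat.zero_mul, List.length_eq_zero_iff] at hs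
    simp [hs]
  | succ q ih =>
    intro s hs
    have hlen : s.length = t.length + q * t.length := by rw [hs]; ring
    constructor
    · intro h
      have h0 : s.take t.length = t := by simpa using h 0 (by omega)
      have hrest : s.drop t.length = (List.replicate q t).flatten := by
        apply (ih (s.drop t.length) (by simp [hlen])).mp
        intro k hk
        rw [List.drop_drop, show t.length + k * t.length = (k + 1) * t.length by ring]
        exact h (k + 1) (by omega)
      calc s = s.take t.length ++ s.drop t.length := (List.take_append_drop _ s).symm
        _ = t ++ (List.replicate q t).flatten := by rw [h0, hrest]
        _ = (List.replicate (q + 1) t).flatten := by simp [List.replicate_succ]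
    · intro h
      subst h
      intro k hk
      rw [List.replicate_succ, List.flatten_cons]
      cases k with
      | zero => simp
      | succ k =>
        rw [show (k + 1) * t.length = t.length + k * t.length by ring]
        have h2 := (ih (List.replicate q t).flatten (by simp)).mpr rfl
        simpa [List.drop_append, List.drop_of_length_le, Nat.add_sub_cancel_left] using h2 k (by omega)

-- A's slice loop over range(0, n, m), read as the blockwise condition
theorem loopA_iff (str1 str2 : String) (hm : 0 < str2.toList.length) (q : Nat)
    (hs : str1.toList.length = q * str2.toList.length) :
    ((PySem.List.pyRange 0 (str1.toList.length : Int) (str2.toList.length : Int)).all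
        (fun i => PySem.Str.slice str1 (some i) (some (i + (str2.toList.length : Int))) == str2) = true
      ↔ ∀ k : Nat, k < q →
          (str1.toList.drop (k * str2.toList.length)).take str2.toList.length = str2.toList) := by
  set m := str2.toList.length with hmdef
  set n := str1.toList.length with hndef
  rw [List.all_eq_true]
  have hmem : ∀ i : Int, i ∈ PySem.List.pyRange 0 (n:Int) (m:Int) ↔ ∃ k : Nat, k < q ∧ i = ((k*m : Nat) : Int) := by
    intro i
    rw [PySem.List.mem_pyRange_iff_of_pos (by exact_mod_cast hm)]
    constructor
    · rintro ⟨h0, hn, hdvd⟩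
      rw [sub_zero] at hdvd
      obtain ⟨c, hc⟩ := hdvd
      have hm' : (0:Int) < (m:Int) := by exact_mod_cast hm
      have hc0 : 0 ≤ c := by nlinarith
      have hnq : i < ((q:Int)) * ((m:Int)) := by
        rw [hs] at hn; exact_mod_cast hn
      have hcq : c < (q:Int) := by nlinarith
      refine ⟨c.toNat, by omega, ?_⟩
      rw [hc]; push_cast [Int.toNat_of_nonneg hc0]; ring
    · rintro ⟨k, hk, rfl⟩
      refine ⟨by positivity, ?_, ?_⟩
      · have hlt : k * m < q * m := Nat.mul_lt_mul_of_pos_right hk hm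
        rw [hs]; exact_mod_cast hlt
      · rw [sub_zero]; exact ⟨(k:Int), by push_cast; ring⟩
  constructor
  · intro h k hk
    have h2 := h _ ((hmem _).mpr ⟨k, hk, rfl⟩)
    rw [show ((k*m:Nat):Int) + (m:Int) = ((k*m:Nat):Int) + ((m:Nat):Int) by norm_cast] at h2
    rw [beq_str_iff, slice_block] at h2
    exact h2
  · intro h i hi
    obtain ⟨k, hk, rfl⟩ := (hmem i).mp hi
    rw [show ((k*m:Nat):Int) + (m:Int) = ((k*m:Nat):Int) + ((m:Nat):Int) by norm_cast]
    rw [beq_str_iff, slice_block]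
    exact h k hk

theorem main_eq (str1 str2 : String) (h2 : str2 ≠ "") :
    is_gcod str1 str2 = is_gcod_alt str1 str2 := by
  have hm : 0 < str2.toList.length := by
    cases hs : str2.toList with
    | nil => exact absurd (String.ext (by simp [hs])) h2
    | cons a l => simp
  simp only [is_gcod, is_gcod_alt, PySem.Str.len_eq]
  by_cases hin : PySem.Str.isIn str2 str1 = true
  · have hinf : str2.toList <:+: str1.toList := (PySem.Str.isIn_iff_infix _ _).mp hin
    have hmn : str2.toList.length ≤ str1.toList.length := hinf.length_le
    simp only [hin, Bool.not_true, Bool.false_eq_true, if_false]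
    by_cases hmod : PySem.Int.mod (str1.toList.length : Int) (str2.toList.length : Int) = 0
    · have hdvd : str2.toList.length ∣ str1.toList.length := by
        rw [PySem.Int.mod_eq_zero_iff_dvd] at hmod; exact_mod_cast hmod
      have hq : str1.toList.length = (str1.toList.length / str2.toList.length) * str2.toList.length :=
        (Nat.div_mul_cancel hdvd).symm
      set q := str1.toList.length / str2.toList.length with hqdef
      have hcond : ¬(((str2.toList.length : Int)) = 0 ∨ ((str1.toList.length : Int)) < ((str2.toList.length : Int)) ∨ PySem.Int.mod ((str1.toList.length : Int)) ((str2.toList.length : Int)) ≠ 0) := by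
        rw [not_or, not_or]
        exact ⟨by exact_mod_cast hm.ne', by exact_mod_cast Nat.not_lt.mpr hmn, not_not_intro hmod⟩
      rw [if_neg (not_not_intro hmod), if_neg hcond]
      have hfl : PySem.Int.floordiv ((str1.toList.length : Int)) ((str2.toList.length : Int)) = ((q : Nat) : Int) := by
        simp [hqdef]
      rw [hfl]
      have hrep : PySem.List.pyRepeat str2.toList ((q:Nat):Int) = (List.replicate q str2.toList).flatten :=
        pyRepeat_natCast _ _
      rw [hrep, Bool.eq_iff_iff, loopA_iff str1 str2 hm q hq, tile_iff str2.toList q str1.toList hq,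
        beq_str_iff, String.toList_ofList]
    · rw [if_pos hmod, if_pos (Or.inr (Or.inr hmod))]
  · have hin' : PySem.Str.isIn str2 str1 = false := by simpa using hin
    simp only [hin', Bool.not_false, if_true]
    by_cases hcond : (((str2.toList.length : Int)) = 0 ∨ ((str1.toList.length : Int)) < ((str2.toList.length : Int)) ∨ PySem.Int.mod ((str1.toList.length : Int)) ((str2.toList.length : Int)) ≠ 0)
    · rw [if_pos hcond]
    · rw [if_neg hcond]
      rw [not_or, not_or] at hcond
      obtain ⟨-, hnm, hmod'⟩ := hcond
      have hmod : PySem.Int.mod ((str1.toList.length : Int)) ((str2.toList.length : Int)) = 0 := not_not.mp hmod'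
      have hmn : str2.toList.length ≤ str1.toList.length := by
        have := Int.not_lt.mp hnm; exact_mod_cast this
      have hq1 : 1 ≤ str1.toList.length / str2.toList.length := (Nat.one_le_div_iff hm).mpr hmn
      symm
      rw [Bool.eq_false_iff]
      intro hbeq
      have heq : str1.toList = PySem.List.pyRepeat str2.toList (PySem.Int.floordiv ((str1.toList.length : Int)) ((str2.toList.length : Int))) := by
        rw [beq_str_iff, String.toList_ofList] at hbeq; exact hbeq
      have hfl : PySem.Int.floordiv ((str1.toList.length : Int)) ((str2.toList.length : Int)) = ((str1.toList.length / str2.toList.length : Nat) : Int) := by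
        simp
      rw [hfl] at heq
      have hrep : PySem.List.pyRepeat str2.toList ((str1.toList.length / str2.toList.length : Nat):Int)
          = (List.replicate (str1.toList.length / str2.toList.length) str2.toList).flatten :=
        pyRepeat_natCast _ _
      rw [hrep] at heq
      obtain ⟨r, hr⟩ : ∃ r, str1.toList.length / str2.toList.length = r + 1 :=
        ⟨_, (Nat.succ_pred_eq_of_pos hq1).symm⟩
      rw [hr, List.replicate_succ, List.flatten_cons] at heq
      have hpre : str2.toList <+: str1.toList := by rw [heq]; exact List.prefix_append _ _
      have hintrue : PySem.Str.isIn str2 str1 = true := (PySem.Str.isIn_iff_infix _ _).mpr hpre.isInfix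
      rw [hintrue] at hin'
      exact absurd hin' (by simp)

-- ===== VERDICT (by name: the statement is the Claim_ definition above) =====
theorem is_gcod_spec : Claim_equal_is_gcod := by
  intro str1 str2 _ hpre
  exact main_eq str1 str2 hpre
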